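-- pv_equiv track=rewrite | github.com/nett00n/hyprlandRPM | scripts/sort-yaml-lists.py | _sort_block
-- ===== SOURCE A (Python) =====
-- def _item_sort_key(line: str) -> str:
--     return line.strip().removeprefix("- ").strip("\"'").lower()
--
-- def _sort_block(lines: list[str]) -> list[str]:
--     """Sort and deduplicate list items; comment lines float to the top."""
--     comments = [ln for ln in lines if ln.strip().startswith("#")]
--     items = [ln for ln in lines if not ln.strip().startswith("#")]
--     items.sort(key=_item_sort_key)
--     seen: set[str] = set()
--     deduped: list[str] = []
--     for ln in items:
--         key = _item_sort_key(ln)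
--         if key not in seen:
--             seen.add(key)
--             deduped.append(ln)
--     return comments + deduped
-- ===== SOURCE B (Python) =====
-- def _item_sort_key(line: str) -> str:
--     return line.strip().removeprefix("- ").strip("\"'").lower()
--
-- def _sort_block(lines: list[str]) -> list[str]:
--     """Sort and deduplicate list items; comment lines float to the top."""
--     comments: list[str] = []
--     ordered: list[str] = []  # kept sorted by key, one line per key (first occurrence wins)
--     for ln in lines:
--         if ln.strip().startswith("#"):
--             comments.append(ln)
--         else:
--             key = _item_sort_key(ln)
--             i = 0
--             while i < len(ordered) and _item_sort_key(ordered[i]) < key: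
--                 i += 1
--             if i == len(ordered) or _item_sort_key(ordered[i]) != key:
--                 ordered.insert(i, ln)
--     return comments + ordered
-- ===== Notes on version B (the rewrite author's own statement) =====
-- stated objective: alternative
-- what changed: Single pass that maintains a key-sorted duplicate-free list by online linear insertion (scan to the insertion point, skip if the key already sits there), instead of A's two filter passes, a library sort of all items and a set+list dedup scan.
import Mathlib
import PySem

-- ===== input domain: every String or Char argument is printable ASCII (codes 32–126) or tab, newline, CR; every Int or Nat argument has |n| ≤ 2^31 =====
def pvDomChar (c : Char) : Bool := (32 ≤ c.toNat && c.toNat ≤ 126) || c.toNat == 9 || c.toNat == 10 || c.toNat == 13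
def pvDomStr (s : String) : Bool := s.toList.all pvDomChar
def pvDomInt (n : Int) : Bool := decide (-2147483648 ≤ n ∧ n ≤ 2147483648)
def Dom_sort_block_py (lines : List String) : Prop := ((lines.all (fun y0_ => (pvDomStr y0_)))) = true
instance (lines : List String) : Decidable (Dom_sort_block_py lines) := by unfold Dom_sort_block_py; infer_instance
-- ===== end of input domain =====

set_option maxHeartbeats 1000000


-- B replaces A's sort-everything-then-set-dedup by a single pass that keeps a key-sorted duplicate-free list via online linear insertion (alternative algorithm, same result); A = B is proved for all inputs.

-- ===== PORT A =====
-- _item_sort_key: line.strip().removeprefix("- ").strip("\"'").lower()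
-- (removeprefix is ported by hand: drop the two prefix characters iff the string starts with "- " — exact)
def itemSortKeyPy (line : String) : String :=
  let t := PySem.Str.strip line
  let t := if PySem.Str.startswith t "- " then String.ofList (t.toList.drop 2) else t
  PySem.Str.lower (PySem.Str.stripChars t "\"'")

-- ln.strip().startswith("#")
def isCommentPy (ln : String) : Bool := PySem.Str.startswith (PySem.Str.strip ln) "#"

def sort_block_py (lines : List String) : List String :=
  let comments := lines.filter (fun ln => isCommentPy ln)
  let items := lines.filter (fun ln => !isCommentPy ln)
  let items := PySem.List.sorted items itemSortKeyPy
  let st := items.foldl (fun (st : PySem.Set String × List String) ln =>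
      let key := itemSortKeyPy ln
      if PySem.Set.contains st.1 key then st
      else (PySem.Set.add st.1 key, st.2 ++ [ln])) (PySem.Set.empty, [])
  comments ++ st.2

-- ===== PORT B =====
-- the while-scan + conditional insert of Source B, as structural recursion on the sorted list:
-- advance while _item_sort_key(ordered[i]) < key; insert unless the key is already at the stop position
def insUnique (x : String) : List String → List String
  | [] => [x]
  | b :: s =>
      if itemSortKeyPy b < itemSortKeyPy x then b :: insUnique x s
      else if itemSortKeyPy b ≠ itemSortKeyPy x then x :: b :: s
      else b :: s

def sort_block_py_alt (lines : List String) : List String :=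
  let st := lines.foldl (fun (st : List String × List String) ln =>
      if isCommentPy ln then (st.1 ++ [ln], st.2)
      else (st.1, insUnique ln st.2)) ([], [])
  st.1 ++ st.2

-- ===== PRECONDITION & SPEC =====
def Spec_sort_block_py (lines : List String) (out : List String) : Prop := out = sort_block_py_alt lines
instance (lines : List String) (out : List String) : Decidable (Spec_sort_block_py lines out) := by unfold Spec_sort_block_py; infer_instance

-- ===== CLAIM (what is proved, stated in full; the proofs are below) =====
def Claim_equal_sort_block_py : Prop := ∀ (lines : List String), Dom_sort_block_py lines → Spec_sort_block_py lines (sort_block_py lines)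

-- ===== LEMMAS AND PROOFS =====

-- dedup-by-key keeping first occurrences, with an accumulator of already-seen keys (A's dedup loop)
def pvH (avoid : List String) : List String → List String
  | [] => []
  | x :: ys =>
      if itemSortKeyPy x ∈ avoid then pvH avoid ys
      else x :: pvH (avoid ++ [itemSortKeyPy x]) ys

theorem mem_pvH (ys : List String) : ∀ (avoid : List String) (y : String),
    y ∈ pvH avoid ys ↔
      (itemSortKeyPy y ∉ avoid ∧
        ys.find? (fun z => itemSortKeyPy z == itemSortKeyPy y) = some y) := by
  induction ys with
  | nil => simp [pvH]
  | cons x ys ih =>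
      intro avoid y
      by_cases hx : itemSortKeyPy x ∈ avoid
      · simp only [pvH, if_pos hx]
        rw [ih]
        constructor
        · rintro ⟨h1, h2⟩
          refine ⟨h1, ?_⟩
          rw [List.find?_cons_of_neg, h2]
          simp only [beq_iff_eq]
          intro h; exact h1 (h ▸ hx)
        · rintro ⟨h1, h2⟩
          refine ⟨h1, ?_⟩
          rw [List.find?_cons_of_neg] at h2
          · exact h2
          · simp only [beq_iff_eq]; intro h; exact h1 (h ▸ hx)
      · simp only [pvH, if_neg hx, List.mem_cons]
        by_cases hy : y = x
        · subst hy
          simp [List.find?_cons_of_pos, hx]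
        · simp only [hy, false_or]
          rw [ih]
          by_cases hk : itemSortKeyPy x = itemSortKeyPy y
          · constructor
            · rintro ⟨h1, _⟩
              exact absurd (Or.inr hk.symm) (by simpa [List.mem_append] using h1)
            · rintro ⟨h1, h2⟩
              rw [List.find?_cons_of_pos (by simp [hk])] at h2
              exact absurd (Option.some_inj.mp h2).symm hy
          · constructor
            · rintro ⟨h1, h2⟩
              simp only [List.mem_append, List.mem_singleton, not_or] at h1
              refine ⟨h1.1, ?_⟩
              rw [List.find?_cons_of_neg (by simp; exact hk), h2]
            · rintro ⟨h1, h2⟩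
              rw [List.find?_cons_of_neg (by simp; exact hk)] at h2
              refine ⟨?_, h2⟩
              simp only [List.mem_append, List.mem_singleton, not_or]
              exact ⟨h1, fun h => hk h.symm⟩

theorem nodup_pvH (ys : List String) : ∀ (avoid : List String), (pvH avoid ys).Nodup := by
  induction ys with
  | nil => simp [pvH]
  | cons x ys ih =>
      intro avoid
      by_cases hx : itemSortKeyPy x ∈ avoid
      · simpa [pvH, hx] using ih avoid
      · simp only [pvH, if_neg hx, List.nodup_cons]
        refine ⟨?_, ih _⟩
        rw [mem_pvH]
        rintro ⟨h1, _⟩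
        exact h1 (by simp)

theorem pairwise_pvH (ys : List String)
    (h : ys.Pairwise (fun a b => itemSortKeyPy a ≤ itemSortKeyPy b)) :
    ∀ (avoid : List String),
      (pvH avoid ys).Pairwise (fun a b => itemSortKeyPy a < itemSortKeyPy b) := by
  induction ys with
  | nil => intro _; simp [pvH]
  | cons x ys ih =>
      intro avoid
      rw [List.pairwise_cons] at h
      by_cases hx : itemSortKeyPy x ∈ avoid
      · simpa [pvH, hx] using ih h.2 avoid
      · simp only [pvH, if_neg hx, List.pairwise_cons]
        refine ⟨?_, ih h.2 _⟩
        intro y hy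
        rw [mem_pvH] at hy
        obtain ⟨h1, h2⟩ := hy
        have hmem : y ∈ ys := List.mem_of_find?_eq_some h2
        have hle := h.1 y hmem
        have hne : itemSortKeyPy y ≠ itemSortKeyPy x := by
          intro h'; exact h1 (by simp [h'])
        exact lt_of_le_of_ne hle (fun h' => hne h'.symm)

theorem find?_insertBy (s : List String)
    (hs : s.Pairwise (fun a b => itemSortKeyPy a ≤ itemSortKeyPy b)) (x : String) (k : String) :
    (PySem.List.insertBy (fun a b => decide (itemSortKeyPy a < itemSortKeyPy b)) x s).find?
        (fun z => itemSortKeyPy z == k)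
      = (s.find? (fun z => itemSortKeyPy z == k)).or
          (if itemSortKeyPy x == k then some x else none) := by
  induction s with
  | nil => simp [PySem.List.insertBy]
  | cons b s ih =>
      rw [List.pairwise_cons] at hs
      simp only [PySem.List.insertBy]
      by_cases hlt : itemSortKeyPy x < itemSortKeyPy b
      · rw [if_pos (by exact decide_eq_true hlt)]
        by_cases hpx : itemSortKeyPy x = k
        · have hnone : (b :: s).find? (fun z => itemSortKeyPy z == k) = none := by
            rw [List.find?_eq_none]
            intro z hz
            simp only [beq_iff_eq]
            rcases List.mem_cons.mp hz with h | h
            · subst h; intro he; rw [he, ← hpx] at hlt; exact lt_irrefl _ hlt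
            · intro he
              have hbz : itemSortKeyPy b ≤ itemSortKeyPy z := hs.1 z h
              rw [he, ← hpx] at hbz
              exact absurd (lt_of_lt_of_le hlt hbz) (lt_irrefl _)
          rw [List.find?_cons_of_pos (by simp [hpx]), hnone]
          simp [hpx]
        · rw [List.find?_cons_of_neg (by simp [hpx])]
          simp [hpx]
      · rw [if_neg (by simpa using hlt)]
        by_cases hpb : itemSortKeyPy b = k
        · rw [List.find?_cons_of_pos (by simp [hpb]), List.find?_cons_of_pos (by simp [hpb])]
          simp
        · rw [List.find?_cons_of_neg (by simp [hpb]), List.find?_cons_of_neg (by simp [hpb])]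
          exact ih hs.2

theorem find?_sorted_append (xs : List String) : ∀ (ys : List String) (k : String),
    (PySem.List.sorted (ys ++ xs) itemSortKeyPy).find? (fun z => itemSortKeyPy z == k)
      = ((PySem.List.sorted ys itemSortKeyPy).find? (fun z => itemSortKeyPy z == k)).or
          (xs.find? (fun z => itemSortKeyPy z == k)) := by
  induction xs with
  | nil => simp
  | cons x xs ih =>
      intro ys k
      have hassoc : ys ++ x :: xs = (ys ++ [x]) ++ xs := by simp
      rw [hassoc, ih (ys ++ [x]) k]
      have hins : PySem.List.sorted (ys ++ [x]) itemSortKeyPy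
          = PySem.List.insertBy (fun a b => decide (itemSortKeyPy a < itemSortKeyPy b)) x
              (PySem.List.sorted ys itemSortKeyPy) := by
        rw [PySem.List.sorted_eq_foldl_insertBy, PySem.List.sorted_eq_foldl_insertBy,
          List.foldl_append]
        rfl
      rw [hins, find?_insertBy _ (PySem.List.sorted_pairwise ys itemSortKeyPy) x k]
      rw [List.find?_cons]
      by_cases hpx : itemSortKeyPy x == k
      · simp only [hpx]
        cases hfy : (PySem.List.sorted ys itemSortKeyPy).find? (fun z => itemSortKeyPy z == k) <;>
          simp
      · simp only [hpx]
        cases hfy : (PySem.List.sorted ys itemSortKeyPy).find? (fun z => itemSortKeyPy z == k) <;>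
          simp

theorem find?_sorted (xs : List String) (k : String) :
    (PySem.List.sorted xs itemSortKeyPy).find? (fun z => itemSortKeyPy z == k)
      = xs.find? (fun z => itemSortKeyPy z == k) := by
  have h := find?_sorted_append xs [] k
  simpa [PySem.List.sorted] using h

theorem aloop_eq_pvH (ys : List String) : ∀ (seen : List String) (acc : List String),
    (ys.foldl (fun (st : PySem.Set String × List String) ln =>
      let key := itemSortKeyPy ln
      if PySem.Set.contains st.1 key then st
      else (PySem.Set.add st.1 key, st.2 ++ [ln])) (seen, acc)).2 = acc ++ pvH seen ys := by
  induction ys with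
  | nil => simp [pvH]
  | cons x ys ih =>
      intro seen acc
      simp only [List.foldl_cons]
      by_cases hx : itemSortKeyPy x ∈ seen
      · have hc : PySem.Set.contains seen (itemSortKeyPy x) = true := by
          simp [PySem.Set.contains, hx]
        simp only [hc, pvH, if_pos hx]
        exact ih seen acc
      · have hc : PySem.Set.contains seen (itemSortKeyPy x) = false := by
          simp [PySem.Set.contains, List.contains_eq_mem, hx]
        simp only [hc, Bool.false_eq_true, if_false, pvH, if_neg hx]
        have hadd : PySem.Set.add seen (itemSortKeyPy x) = seen ++ [itemSortKeyPy x] := by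
          simp [PySem.Set.add, PySem.Set.contains, List.contains_eq_mem, hx]
        rw [hadd, ih (seen ++ [itemSortKeyPy x]) (acc ++ [x])]
        simp

-- B-side lemmas about the online insertion

theorem mem_insUnique (x : String) (s : List String)
    (hs : s.Pairwise (fun a b => itemSortKeyPy a < itemSortKeyPy b)) (y : String) :
    y ∈ insUnique x s ↔ y ∈ s ∨ (y = x ∧ ∀ z ∈ s, itemSortKeyPy z ≠ itemSortKeyPy x) := by
  induction s with
  | nil => simp [insUnique]
  | cons b s ih =>
      rw [List.pairwise_cons] at hs
      simp only [insUnique]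
      by_cases h1 : itemSortKeyPy b < itemSortKeyPy x
      · rw [if_pos h1]
        have hb : itemSortKeyPy b ≠ itemSortKeyPy x := ne_of_lt h1
        rw [List.mem_cons, List.mem_cons, ih hs.2, List.forall_mem_cons]
        constructor
        · rintro (h | h | ⟨h2, h3⟩)
          · exact Or.inl (Or.inl h)
          · exact Or.inl (Or.inr h)
          · exact Or.inr ⟨h2, hb, h3⟩
        · rintro ((h | h) | ⟨h2, _, h3⟩)
          · exact Or.inl h
          · exact Or.inr (Or.inl h)
          · exact Or.inr (Or.inr ⟨h2, h3⟩)
      · rw [if_neg h1]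
        by_cases h2 : itemSortKeyPy b ≠ itemSortKeyPy x
        · rw [if_pos h2]
          have hxb : itemSortKeyPy x < itemSortKeyPy b :=
            lt_of_le_of_ne (le_of_not_gt h1) (fun h => h2 h.symm)
          have hall : ∀ z ∈ b :: s, itemSortKeyPy z ≠ itemSortKeyPy x := by
            intro z hz
            rcases List.mem_cons.mp hz with h | h
            · exact h ▸ h2
            · exact ne_of_gt (lt_trans hxb (hs.1 z h))
          rw [List.mem_cons]
          constructor
          · rintro (h | h)
            · exact Or.inr ⟨h, hall⟩
            · exact Or.inl h
          · rintro (h | ⟨h3, _⟩)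
            · exact Or.inr h
            · exact Or.inl h3
        · rw [if_neg h2]
          push_neg at h2
          have hnot : ¬ (∀ z ∈ b :: s, itemSortKeyPy z ≠ itemSortKeyPy x) :=
            fun h => h b (List.mem_cons_self) h2
          constructor
          · exact fun h => Or.inl h
          · rintro (h | ⟨_, h4⟩)
            · exact h
            · exact absurd h4 hnot

theorem pairwise_insUnique (x : String) (s : List String)
    (hs : s.Pairwise (fun a b => itemSortKeyPy a < itemSortKeyPy b)) :
    (insUnique x s).Pairwise (fun a b => itemSortKeyPy a < itemSortKeyPy b) := by
  induction s with
  | nil => simp [insUnique]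
  | cons b s ih =>
      have hs' := List.pairwise_cons.mp hs
      simp only [insUnique]
      by_cases h1 : itemSortKeyPy b < itemSortKeyPy x
      · rw [if_pos h1, List.pairwise_cons]
        refine ⟨?_, ih hs'.2⟩
        intro y hy
        rcases (mem_insUnique x s hs'.2 y).mp hy with h | ⟨h2, _⟩
        · exact hs'.1 y h
        · exact h2 ▸ h1
      · rw [if_neg h1]
        by_cases h2 : itemSortKeyPy b ≠ itemSortKeyPy x
        · rw [if_pos h2, List.pairwise_cons]
          have hxb : itemSortKeyPy x < itemSortKeyPy b :=
            lt_of_le_of_ne (le_of_not_gt h1) (fun h => h2 h.symm)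
          refine ⟨?_, hs⟩
          intro y hy
          rcases List.mem_cons.mp hy with h | h
          · exact h ▸ hxb
          · exact lt_trans hxb (hs'.1 y h)
        · rw [if_neg h2]
          exact hs

theorem bloop_mem (xs : List String) : ∀ (s : List String)
    (_ : s.Pairwise (fun a b => itemSortKeyPy a < itemSortKeyPy b)) (y : String),
    y ∈ xs.foldl (fun s ln => insUnique ln s) s ↔
      y ∈ s ∨ ((∀ z ∈ s, itemSortKeyPy z ≠ itemSortKeyPy y) ∧
        xs.find? (fun z => itemSortKeyPy z == itemSortKeyPy y) = some y) := by
  induction xs with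
  | nil => simp
  | cons x xs ih =>
      intro s hs y
      rw [List.foldl_cons, ih (insUnique x s) (pairwise_insUnique x s hs) y]
      rw [mem_insUnique x s hs y]
      by_cases hk : itemSortKeyPy x = itemSortKeyPy y
      · rw [List.find?_cons_of_pos (by simp [hk])]
        constructor
        · rintro ((h | ⟨h1, h2⟩) | ⟨h3, h4⟩)
          · exact Or.inl h
          · subst h1; exact Or.inr ⟨fun z hz hc => h2 z hz (hc.trans hk.symm), rfl⟩
          · exfalso
            have hxm : x ∈ insUnique x s ∨ (∃ z ∈ s, itemSortKeyPy z = itemSortKeyPy x) := by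
              by_cases hfresh : ∀ z ∈ s, itemSortKeyPy z ≠ itemSortKeyPy x
              · exact Or.inl ((mem_insUnique x s hs x).mpr (Or.inr ⟨rfl, hfresh⟩))
              · push_neg at hfresh; exact Or.inr hfresh
            rcases hxm with h | ⟨z, hz, hzk⟩
            · exact h3 x h (hk)
            · exact h3 z ((mem_insUnique x s hs z).mpr (Or.inl hz)) (hzk.trans hk)
        · rintro (h | ⟨h1, h2⟩)
          · exact Or.inl (Or.inl h)
          · have hy : y = x := (Option.some_inj.mp h2.symm)
            subst hy
            exact Or.inl (Or.inr ⟨rfl, fun z hz hc => h1 z hz (hc.trans hk)⟩)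
      · rw [List.find?_cons_of_neg (by simp [hk])]
        constructor
        · rintro ((h | ⟨h1, _⟩) | ⟨h3, h4⟩)
          · exact Or.inl h
          · exact absurd ((congrArg itemSortKeyPy h1.symm).trans rfl) hk
          · refine Or.inr ⟨?_, h4⟩
            intro z hz
            exact h3 z ((mem_insUnique x s hs z).mpr (Or.inl hz))
        · rintro (h | ⟨h1, h2⟩)
          · exact Or.inl (Or.inl h)
          · refine Or.inr ⟨?_, h2⟩
            intro z hz
            rcases (mem_insUnique x s hs z).mp hz with h | ⟨hzx, _⟩
            · exact h1 z h
            · intro hc; exact hk ((congrArg itemSortKeyPy hzx.symm).trans hc)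
        
theorem bsplit (lines : List String) : ∀ (cs : List String) (s : List String),
    lines.foldl (fun (st : List String × List String) ln =>
      if isCommentPy ln then (st.1 ++ [ln], st.2)
      else (st.1, insUnique ln st.2)) (cs, s)
      = (cs ++ lines.filter (fun ln => isCommentPy ln),
         (lines.filter (fun ln => !isCommentPy ln)).foldl
           (fun s ln => insUnique ln s) s) := by
  induction lines with
  | nil => simp
  | cons x lines ih =>
      intro cs s
      by_cases hx : isCommentPy x = true
      · rw [List.foldl_cons, if_pos hx, ih (cs ++ [x]) s]
        simp [hx]
      · rw [List.foldl_cons, if_neg hx, ih cs (insUnique x s)]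
        simp only [Bool.not_eq_true] at hx
        simp [hx]

theorem pairwise_bloop (xs : List String) : ∀ (s : List String),
    s.Pairwise (fun a b => itemSortKeyPy a < itemSortKeyPy b) →
    (xs.foldl (fun s ln => insUnique ln s) s).Pairwise
      (fun a b => itemSortKeyPy a < itemSortKeyPy b) := by
  induction xs with
  | nil => intro s hs; simpa using hs
  | cons x xs ih =>
      intro s hs
      rw [List.foldl_cons]
      exact ih _ (pairwise_insUnique x s hs)

theorem nodup_of_pairwise_lt (s : List String)
    (hs : s.Pairwise (fun a b => itemSortKeyPy a < itemSortKeyPy b)) : s.Nodup :=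
  hs.imp (fun h => by intro he; subst he; exact absurd h (lt_irrefl _))

-- B's fold result equals A's sorted-then-deduped list
theorem bloop_eq (xs : List String) :
    xs.foldl (fun s ln => insUnique ln s) []
      = pvH [] (PySem.List.sorted xs itemSortKeyPy) := by
  have hP : (xs.foldl (fun s ln => insUnique ln s) []).Pairwise
      (fun a b => itemSortKeyPy a < itemSortKeyPy b) := pairwise_bloop xs [] (by simp)
  have hPv := pairwise_pvH (PySem.List.sorted xs itemSortKeyPy)
      (PySem.List.sorted_pairwise xs itemSortKeyPy) []
  have hperm : (xs.foldl (fun s ln => insUnique ln s) []).Perm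
      (pvH [] (PySem.List.sorted xs itemSortKeyPy)) := by
    rw [List.perm_ext_iff_of_nodup (nodup_of_pairwise_lt _ hP) (nodup_pvH _ _)]
    intro y
    rw [bloop_mem xs [] (by simp) y, mem_pvH, find?_sorted]
    simp
  have h1 : PySem.List.sorted (xs.foldl (fun s ln => insUnique ln s) []) itemSortKeyPy
      = xs.foldl (fun s ln => insUnique ln s) [] :=
    PySem.List.sorted_eq_of_perm_of_pairwise_lt _ _ _ (List.Perm.refl _) hP
  have h2 : PySem.List.sorted (xs.foldl (fun s ln => insUnique ln s) []) itemSortKeyPy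
      = pvH [] (PySem.List.sorted xs itemSortKeyPy) :=
    PySem.List.sorted_eq_of_perm_of_pairwise_lt _ _ _ hperm.symm hPv
  rw [← h1, h2]

-- ===== VERDICT (by name: the statement is the Claim_ definition above) =====
theorem sort_block_py_spec : Claim_equal_sort_block_py := by
  intro lines _
  unfold Spec_sort_block_py sort_block_py sort_block_py_alt
  have hS := bsplit lines [] []
  have hA := aloop_eq_pvH
    (PySem.List.sorted (lines.filter (fun ln => !isCommentPy ln)) itemSortKeyPy)
    PySem.Set.empty []
  dsimp only at hS hA ⊢
  rw [hS, hA]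
  have he : (PySem.Set.empty : List String) = [] := rfl
  rw [he, bloop_eq]
  simp
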